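-- pv_equiv track=rewrite | github.com/toniuyt123/internship_tasks | toniuyt-quick_tasks/goats.py | goat
-- ===== SOURCE A (Python) =====
-- from collections import Counter
--
-- def goat(goats_count, min_courses, goats):
--     goats.sort(reverse = True)
--     capacity = goats[0]
--     while True:
--         free_space = capacity
--         current_trips = 0
--         sent_goats = []
--         end = 0
--         while True:
--             next_goat = biggest_goat(free_space, goats, sent_goats)
--             if(next_goat >= 0):
--                 free_space -= next_goat
--                 sent_goats.append(next_goat)
--                 sent_goats.sort(reverse=True)
--                 if sent_goats == goats:
--                     return capacity
--             else:
--                 current_trips += 1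
--                 free_space = capacity
--                 if current_trips == min_courses:
--                     capacity += 1
--                     break
--
-- def biggest_goat(free_space, goats, sent_goats):
--     c1 = Counter(goats)
--     c2 = Counter(sent_goats)
--     diff = c1-c2
--     for i in range(0, len(goats)):
--         if(goats[i] <= free_space and goats[i] in list(diff.elements())):
--             return goats[i]
--     return -1
-- ===== SOURCE B (Python) =====
-- def goat(goats_count, min_courses, goats):
--     goats.sort(reverse=True)
--     capacity = goats[0]
--     if min_courses <= 0:
--         # a non-positive course limit never blocks: the smallest possible truck works
--         return capacity
--     while trips_needed(capacity, goats) > min_courses: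
--         capacity += 1
--     return capacity
--
-- def trips_needed(capacity, goats):
--     # goats is sorted descending; each course is one left-to-right scan taking
--     # every goat that still fits (= always loading the biggest goat that fits)
--     remaining = goats
--     trips = 0
--     while remaining:
--         free = capacity
--         nxt = []
--         for g in remaining:
--             if g <= free:
--                 free -= g
--             else:
--                 nxt.append(g)
--         remaining = nxt
--         trips += 1
--     return trips
-- ===== Notes on version B (the rewrite author's own statement) =====
-- stated objective: faster
-- what changed: A re-derives the whole remaining multiset (Counter(goats)-Counter(sent), materialised as a list) for every single goat it loads and re-sorts sent_goats after each load; B never tracks sent goats at all: per candidate capacity it counts the courses directly, each course being one left-to-right scan over the descending remaining list that loads every goat that still fits (the same greedy choice). Intended as faster (O(n*courses) instead of O(n^3) per candidate capacity); a timing run could not produce a clean ratio: A timed out at n=16 where B returned.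
import Mathlib
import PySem

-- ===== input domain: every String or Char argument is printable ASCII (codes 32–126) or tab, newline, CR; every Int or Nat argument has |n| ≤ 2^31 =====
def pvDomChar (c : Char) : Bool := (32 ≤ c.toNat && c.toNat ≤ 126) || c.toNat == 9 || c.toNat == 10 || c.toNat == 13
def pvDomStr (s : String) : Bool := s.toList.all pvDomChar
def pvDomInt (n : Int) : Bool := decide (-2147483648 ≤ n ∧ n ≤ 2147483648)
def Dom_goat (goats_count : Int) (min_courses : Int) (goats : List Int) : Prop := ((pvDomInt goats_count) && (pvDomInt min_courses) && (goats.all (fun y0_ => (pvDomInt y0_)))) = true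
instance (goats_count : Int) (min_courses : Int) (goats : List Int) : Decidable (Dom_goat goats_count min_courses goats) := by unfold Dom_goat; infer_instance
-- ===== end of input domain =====

-- B replaces A's per-pick Counter rebuilding by one descending scan per course (same greedy choice),
-- intended as faster (a timing run got no clean ratio: Python A timed out at n=16 where B returned);
-- both A and B sort 'goats' in place in Python (the proof is about the return value).

-- ===== PORT A =====
-- biggest_goat: 'goats[i] in list((Counter(goats)-Counter(sent)).elements())' is
-- 'sent.count g < goats.count g' (Counter subtraction keeps positive multiplicities only): exact.
def biggestGoatGo (free : Int) (goats sent : List Int) : List Int → Int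
  | [] => -1
  | g :: rest =>
    if g ≤ free ∧ sent.count g < goats.count g then g
    else biggestGoatGo free goats sent rest

def biggestGoat (free : Int) (goats sent : List Int) : Int :=
  biggestGoatGo free goats sent goats

-- A's inner 'while True', fueled (the fuel is a totality guard only: 2*len+2 suffices under Pre_)
def goatInnerA (s : List Int) (cap mc : Int) : Nat → Int → Int → List Int → Option (Option Int)
  | 0, _, _, _ => none
  | fuel+1, free, trips, sent =>
    let ng := biggestGoat free s sent
    if 0 ≤ ng then
      let sent' := PySem.List.sorted (sent ++ [ng]) (fun x => x) true
      if sent' = s then some (some cap)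
      else goatInnerA s cap mc fuel (free - ng) trips sent'
    else
      if trips + 1 = mc then some none
      else goatInnerA s cap mc fuel cap (trips + 1) sent

-- A's outer 'while True', fueled (totality guard: under Pre_ the loop returns by capacity = sum(goats))
def goatOuterA (s : List Int) (mc : Int) : Nat → Int → Option Int
  | 0, _ => none
  | fuel+1, cap =>
    match goatInnerA s cap mc (2 * s.length + 2) cap 0 [] with
    | some (some ans) => some ans
    | some none => goatOuterA s mc fuel (cap + 1)
    | none => none

def goat (goats_count : Int) (min_courses : Int) (goats : List Int) : Int :=
  let s := PySem.List.sorted goats (fun x => x) true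
  match PySem.List.pyGet? s 0 with
  | none => 0   -- goats[0] raises IndexError in Python (excluded by Pre_)
  | some m => (goatOuterA s min_courses ((s.sum - m).toNat + 1) m).getD 0

-- ===== PORT B =====
-- one course: a single left-to-right scan over the descending remaining goats (B's inner for-loop)
def goatTripB (cap : Int) (remaining : List Int) : Int × List Int :=
  remaining.foldl (fun st g => if g ≤ st.1 then (st.1 - g, st.2) else (st.1, st.2 ++ [g])) (cap, [])

-- B's trips_needed 'while remaining', fueled (totality guard: len+1 suffices under Pre_)
def goatTripsB (cap : Int) : Nat → List Int → Int → Int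
  | 0, _, trips => trips
  | fuel+1, remaining, trips =>
    match remaining with
    | [] => trips
    | _ => goatTripsB cap fuel (goatTripB cap remaining).2 (trips + 1)

-- B's outer 'while', fueled (totality guard, same bound as A's)
def goatOuterB (s : List Int) (mc : Int) : Nat → Int → Int
  | 0, cap => cap
  | fuel+1, cap =>
    if goatTripsB cap (s.length + 1) s 0 ≤ mc then cap
    else goatOuterB s mc fuel (cap + 1)

def goat_alt (goats_count : Int) (min_courses : Int) (goats : List Int) : Int :=
  let s := PySem.List.sorted goats (fun x => x) true
  match PySem.List.pyGet? s 0 with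
  | none => 0
  | some m => if min_courses ≤ 0 then m else goatOuterB s min_courses ((s.sum - m).toNat + 1) m

-- ===== PRECONDITION & SPEC =====
-- Pre_ excludes the empty list (A raises IndexError on goats[0]) and lists containing a negative
-- goat (A's 'next_goat >= 0' test can never send such a goat, so A loops forever and returns nothing).
def Pre_goat (goats_count : Int) (min_courses : Int) (goats : List Int) : Prop :=
  goats ≠ [] ∧ ∀ g ∈ goats, 0 ≤ g
instance (goats_count : Int) (min_courses : Int) (goats : List Int) : Decidable (Pre_goat goats_count min_courses goats) := by unfold Pre_goat; infer_instance

def pvWitness_goat : Int × Int × List Int := (3, 2, [3, 1, 2])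

def Spec_goat (goats_count : Int) (min_courses : Int) (goats : List Int) (out : Int) : Prop := out = goat_alt goats_count min_courses goats
instance (goats_count : Int) (min_courses : Int) (goats : List Int) (out : Int) : Decidable (Spec_goat goats_count min_courses goats out) := by unfold Spec_goat; infer_instance

-- ===== CLAIM (what is proved, stated in full; the proofs are below) =====
def Claim_equal_goat : Prop := ∀ (goats_count : Int) (min_courses : Int) (goats : List Int), Dom_goat goats_count min_courses goats → Pre_goat goats_count min_courses goats → Spec_goat goats_count min_courses goats (goat goats_count min_courses goats)

-- ===== LEMMAS AND PROOFS =====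

-- descending order (what Python's sort(reverse=True) establishes)
def DescI (l : List Int) : Prop := l.Pairwise (fun a b => b ≤ a)

-- purely structural form of one course (B's scan): the goats left behind
def scanT (free : Int) : List Int → List Int
  | [] => []
  | g :: rest => if g ≤ free then scanT (free - g) rest else g :: scanT free rest

-- first element that fits (= the biggest fitting one, on a descending list)
def firstFit (free : Int) : List Int → Option Int
  | [] => none
  | g :: rest => if g ≤ free then some g else firstFit free rest

-- A's inner loop re-expressed on the remaining multiset R instead of (goats, sent) counters
def innerAbs (cap mc : Int) : Nat → Int → Int → List Int → Option (Option Int)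
  | 0, _, _, _ => none
  | fuel+1, free, t, R =>
    match firstFit free R with
    | some g =>
      if R.erase g = [] then some (some cap)
      else innerAbs cap mc fuel (free - g) t (R.erase g)
    | none =>
      if t + 1 = mc then some none
      else innerAbs cap mc fuel cap (t + 1) R

theorem scanT_sublist (free : Int) (R : List Int) : (scanT free R).Sublist R := by
  induction R generalizing free with
  | nil => simp [scanT]
  | cons g rest ih =>
    simp only [scanT]
    split
    · exact (ih _).trans (List.sublist_cons_self g rest)
    · exact List.Sublist.cons₂ g (ih _)

theorem firstFit_none (free : Int) (R : List Int) (h : firstFit free R = none) :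
    ∀ v ∈ R, free < v := by
  induction R with
  | nil => simp
  | cons g rest ih =>
    simp only [firstFit] at h
    split at h
    · exact absurd h (by simp)
    · intro v hv
      rcases List.mem_cons.mp hv with rfl | hv
      · omega
      · exact ih h v hv

theorem firstFit_some (free : Int) (R : List Int) (g : Int) (h : firstFit free R = some g) :
    g ∈ R ∧ g ≤ free := by
  induction R with
  | nil => simp [firstFit] at h
  | cons x rest ih =>
    simp only [firstFit] at h
    split at h
    · rcases Option.some.inj h with rfl
      exact ⟨List.mem_cons_self, by assumption⟩
    · exact ⟨List.mem_cons_of_mem _ (ih h).1, (ih h).2⟩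

theorem scanT_of_none (free : Int) (R : List Int) (h : firstFit free R = none) :
    scanT free R = R := by
  induction R with
  | nil => simp [scanT]
  | cons g rest ih =>
    simp only [firstFit] at h
    split at h
    · exact absurd h (by simp)
    · rename_i hg
      simp only [scanT, if_neg hg]
      rw [ih h]

theorem scanT_erase (free : Int) (R : List Int) (g : Int)
    (hnn : ∀ v ∈ R, 0 ≤ v) (h : firstFit free R = some g) :
    scanT free R = scanT (free - g) (R.erase g) := by
  induction R generalizing free with
  | nil => simp [firstFit] at h
  | cons x rest ih =>
    simp only [firstFit] at h
    split at h
    · rcases Option.some.inj h with rfl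
      simp [scanT, List.erase_cons_head, *]
    · rename_i hx
      have hg := firstFit_some free rest g h
      have hxg : x ≠ g := by
        intro rfl'; subst rfl'; omega
      rw [List.erase_cons_tail (by simpa using hxg)]
      have hg0 : 0 ≤ g := hnn g (List.mem_cons_of_mem _ hg.1)
      have hx' : ¬ x ≤ free - g := by omega
      simp only [scanT, if_neg hx, if_neg hx']
      rw [ih free (fun v hv => hnn v (List.mem_cons_of_mem _ hv)) h]

theorem scanT_nil_of_sum_le (free : Int) (R : List Int)
    (hnn : ∀ v ∈ R, 0 ≤ v) (h : R.sum ≤ free) : scanT free R = [] := by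
  induction R generalizing free with
  | nil => simp [scanT]
  | cons g rest ih =>
    have hrest : (0:Int) ≤ rest.sum :=
      List.sum_nonneg (fun v hv => hnn v (List.mem_cons_of_mem _ hv))
    have hsum : g + rest.sum ≤ free := by simpa using h
    have hg : g ≤ free := by omega
    simp only [scanT, if_pos hg]
    exact ih (free - g) (fun v hv => hnn v (List.mem_cons_of_mem _ hv)) (by omega)

theorem scanT_len_lt (free : Int) (R : List Int) (g : Int)
    (hnn : ∀ v ∈ R, 0 ≤ v) (h : firstFit free R = some g) :
    (scanT free R).length < R.length := by
  rw [scanT_erase free R g hnn h]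
  have h1 := (scanT_sublist (free - g) (R.erase g)).length_le
  have hm := (firstFit_some free R g h).1
  have h2 := List.length_erase_of_mem hm
  have h3 : 1 ≤ R.length := List.length_pos_of_mem hm
  omega

theorem goatTripB_aux (l : List Int) : ∀ (free : Int) (acc : List Int),
    (l.foldl (fun st g => if g ≤ st.1 then (st.1 - g, st.2) else (st.1, st.2 ++ [g])) (free, acc)).2
      = acc ++ scanT free l := by
  induction l with
  | nil => intro free acc; simp [scanT]
  | cons g rest ih =>
    intro free acc
    simp only [List.foldl_cons, scanT]
    by_cases hg : g ≤ free
    · rw [if_pos hg, if_pos hg, ih]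
    · rw [if_neg hg, if_neg hg, ih]
      simp

theorem goatTripB_snd (cap : Int) (R : List Int) : (goatTripB cap R).2 = scanT cap R := by
  unfold goatTripB
  rw [goatTripB_aux]
  simp

theorem tripsB_offset (cap : Int) (fuel : Nat) (R : List Int) (t : Int) :
    goatTripsB cap fuel R t = t + goatTripsB cap fuel R 0 := by
  induction fuel generalizing R t with
  | zero => simp [goatTripsB]
  | succ f ih =>
    cases R with
    | nil => simp [goatTripsB]
    | cons g rest =>
      simp only [goatTripsB]
      rw [ih _ (t + 1), ih _ (0 + 1)]
      ring

theorem tripsB_fuel (cap : Int) (R : List Int) (hle : ∀ v ∈ R, 0 ≤ v ∧ v ≤ cap) :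
    ∀ f f' t, R.length < f → R.length < f' →
    goatTripsB cap f R t = goatTripsB cap f' R t := by
  induction hn : R.length using Nat.strong_induction_on generalizing R with
  | _ n ih =>
    intro f f' t hf hf'
    cases R with
    | nil =>
      obtain ⟨f, rfl⟩ : ∃ k, f = k + 1 := ⟨f - 1, by omega⟩
      obtain ⟨f', rfl⟩ : ∃ k, f' = k + 1 := ⟨f' - 1, by omega⟩
      simp [goatTripsB]
    | cons g rest =>
      obtain ⟨f, rfl⟩ : ∃ k, f = k + 1 := ⟨f - 1, by omega⟩
      obtain ⟨f', rfl⟩ : ∃ k, f' = k + 1 := ⟨f' - 1, by omega⟩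
      simp only [goatTripsB]
      have hfit : firstFit cap (g :: rest) = some g := by
        simp [firstFit, (hle g List.mem_cons_self).2]
      have hlt : (scanT cap (g :: rest)).length < (g :: rest).length :=
        scanT_len_lt cap (g :: rest) g (fun v hv => (hle v hv).1) hfit
      have hsub := scanT_sublist cap (g :: rest)
      rw [goatTripB_snd]
      exact ih _ (by omega) _ (fun v hv => hle v (hsub.mem hv)) rfl _ _ _ (by omega) (by omega)

theorem tripsB_nonneg (cap : Int) (fuel : Nat) (R : List Int) :
    0 ≤ goatTripsB cap fuel R 0 := by
  induction fuel generalizing R with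
  | zero => simp [goatTripsB]
  | succ f ih =>
    cases R with
    | nil => simp [goatTripsB]
    | cons g rest =>
      simp only [goatTripsB]
      rw [tripsB_offset]
      have := ih (goatTripB cap (g :: rest)).2
      omega

-- a course that clears everything: A's inner loop returns success within |R| steps
theorem innerAbs_succ (cap mc : Int) : ∀ (R : List Int) (free t : Int) (f : Nat),
    R ≠ [] → scanT free R = [] → R.length ≤ f →
    innerAbs cap mc f free t R = some (some cap) := by
  intro R
  induction R with
  | nil => intro free t f hne _ _; exact absurd rfl hne
  | cons g rest ih =>
    intro free t f _ hscan hf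
    obtain ⟨f, rfl⟩ : ∃ k, f = k + 1 := ⟨f - 1, by simp at hf; omega⟩
    have hg : g ≤ free := by
      by_contra hg
      simp [scanT, if_neg hg] at hscan
    have hrest : scanT (free - g) rest = [] := by simpa [scanT, if_pos hg] using hscan
    have hfit : firstFit free (g :: rest) = some g := by simp [firstFit, hg]
    simp only [innerAbs, hfit]
    rw [List.erase_cons_head]
    cases rest with
    | nil => simp
    | cons h2 rest2 =>
      rw [if_neg (by simp)]
      exact ih (free - g) t f (by simp) hrest (by simp at hf ⊢; omega)

-- a course that gets stuck: A's inner loop reaches the failure branch after its picks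
theorem innerAbs_fail_aux (cap mc : Int) : ∀ (n : Nat) (R : List Int) (free t : Int) (f : Nat),
    R.length = n → (∀ v ∈ R, 0 ≤ v) → scanT free R ≠ [] →
    innerAbs cap mc ((R.length - (scanT free R).length) + 1 + f) free t R =
      if t + 1 = mc then some none else innerAbs cap mc f cap (t + 1) (scanT free R) := by
  intro n
  induction n using Nat.strong_induction_on with
  | _ n ih =>
    intro R free t f hn hnn hne
    cases hfit : firstFit free R with
    | none =>
      rw [scanT_of_none free R hfit] at hne ⊢
      have h0 : R.length - R.length + 1 + f = f + 1 := by omega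
      rw [h0]
      simp only [innerAbs, hfit]
    | some g =>
      have hS : scanT free R = scanT (free - g) (R.erase g) := scanT_erase free R g hnn hfit
      have hm := (firstFit_some free R g hfit).1
      have hlen := List.length_erase_of_mem hm
      have hpos : 1 ≤ R.length := List.length_pos_of_mem hm
      have hlt : (scanT free R).length < R.length := scanT_len_lt free R g hnn hfit
      have herne : R.erase g ≠ [] := by
        intro h0
        rw [hS, h0] at hne
        simp [scanT] at hne
      have hstep : (R.length - (scanT free R).length) + 1 + f
          = (((R.erase g).length - (scanT (free - g) (R.erase g)).length) + 1 + f) + 1 := by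
        have := (scanT_sublist (free - g) (R.erase g)).length_le
        rw [hS] at hlt ⊢
        omega
      rw [hstep]
      simp only [innerAbs, hfit, if_neg herne]
      have hnn' : ∀ v ∈ R.erase g, 0 ≤ v := fun v hv => hnn v (List.mem_of_mem_erase hv)
      rw [hS]
      exact ih (R.erase g).length (by omega) (R.erase g) (free - g) t f rfl hnn'
        (by rw [← hS]; exact hne)

theorem innerAbs_fail (cap mc : Int) (R : List Int) (free t : Int) (f : Nat)
    (hnn : ∀ v ∈ R, 0 ≤ v) (hne : scanT free R ≠ []) :
    innerAbs cap mc ((R.length - (scanT free R).length) + 1 + f) free t R =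
      if t + 1 = mc then some none else innerAbs cap mc f cap (t + 1) (scanT free R) :=
  innerAbs_fail_aux cap mc R.length R free t f rfl hnn hne

-- the per-capacity characterisation: A's inner loop succeeds iff B's trip count fits in mc
theorem tripsB_nil (cap : Int) (f : Nat) (t : Int) : goatTripsB cap f [] t = t := by
  cases f <;> simp [goatTripsB]

theorem tripsB_step (cap : Int) (f : Nat) (g : Int) (rest : List Int) (t : Int) :
    goatTripsB cap (f + 1) (g :: rest) t
      = goatTripsB cap f (scanT cap (g :: rest)) t + 1 := by
  simp only [goatTripsB]
  rw [goatTripB_snd, tripsB_offset, tripsB_offset cap f _ t]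
  ring

theorem innerAbs_main_aux (cap mc : Int) : ∀ (n : Nat) (R : List Int), R.length = n →
    (∀ v ∈ R, 0 ≤ v ∧ v ≤ cap) → R ≠ [] → ∀ (t : Int) (f : Nat), 2 * R.length + 2 ≤ f →
    innerAbs cap mc f cap t R =
      some (if mc ≤ t ∨ t + goatTripsB cap (R.length + 1) R 0 ≤ mc then some cap else none) := by
  intro n
  induction n using Nat.strong_induction_on with
  | _ n ih =>
    intro R hn hle hne t f hf
    have hnn : ∀ v ∈ R, 0 ≤ v := fun v hv => (hle v hv).1
    obtain ⟨g, rest, rfl⟩ : ∃ g rest, R = g :: rest := by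
      cases R with
      | nil => exact absurd rfl hne
      | cons g rest => exact ⟨g, rest, rfl⟩
    have hfit : firstFit cap (g :: rest) = some g := by
      simp [firstFit, (hle g List.mem_cons_self).2]
    have hT : goatTripsB cap ((g :: rest).length + 1) (g :: rest) 0
        = goatTripsB cap (g :: rest).length (scanT cap (g :: rest)) 0 + 1 :=
      tripsB_step cap (g :: rest).length g rest 0
    by_cases hscan : scanT cap (g :: rest) = []
    · rw [innerAbs_succ cap mc (g :: rest) cap t f hne hscan (by omega)]
      rw [hT, hscan, tripsB_nil]
      rw [if_pos (by omega)]
    · have hlt : (scanT cap (g :: rest)).length < (g :: rest).length :=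
        scanT_len_lt cap (g :: rest) g hnn hfit
      have hsub := scanT_sublist cap (g :: rest)
      have hle1 : ∀ v ∈ scanT cap (g :: rest), 0 ≤ v ∧ v ≤ cap :=
        fun v hv => hle v (hsub.mem hv)
      have hfuel : f = ((g :: rest).length - (scanT cap (g :: rest)).length) + 1
          + (f - ((g :: rest).length - (scanT cap (g :: rest)).length) - 1) := by omega
      rw [hfuel, innerAbs_fail cap mc (g :: rest) cap t _ hnn hscan]
      have hTfuel : goatTripsB cap (g :: rest).length (scanT cap (g :: rest)) 0
          = goatTripsB cap ((scanT cap (g :: rest)).length + 1) (scanT cap (g :: rest)) 0 :=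
        tripsB_fuel cap _ hle1 _ _ 0 (by omega) (by omega)
      have hT1 : 1 ≤ goatTripsB cap ((scanT cap (g :: rest)).length + 1) (scanT cap (g :: rest)) 0 := by
        obtain ⟨g1, rest1, hR1⟩ : ∃ g1 rest1, scanT cap (g :: rest) = g1 :: rest1 := by
          cases hx : scanT cap (g :: rest) with
          | nil => exact absurd hx hscan
          | cons g1 rest1 => exact ⟨g1, rest1, rfl⟩
        rw [hR1, tripsB_step]
        have := tripsB_nonneg cap (g1 :: rest1).length (scanT cap (g1 :: rest1))
        omega
      by_cases hmc : t + 1 = mc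
      · rw [if_pos hmc, if_neg (by rw [hT, hTfuel]; omega)]
      · rw [if_neg hmc]
        rw [ih (scanT cap (g :: rest)).length (by omega) _ rfl hle1 hscan (t + 1) _ (by omega)]
        rw [hT, hTfuel]
        by_cases hcond : mc ≤ t ∨ t + (goatTripsB cap ((scanT cap (g :: rest)).length + 1) (scanT cap (g :: rest)) 0 + 1) ≤ mc
        · rw [if_pos hcond, if_pos (by omega)]
        · rw [if_neg hcond, if_neg (by omega)]

theorem innerAbs_main (cap mc : Int) : ∀ R : List Int,
    (∀ v ∈ R, 0 ≤ v ∧ v ≤ cap) → R ≠ [] → ∀ (t : Int) (f : Nat), 2 * R.length + 2 ≤ f →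
    innerAbs cap mc f cap t R =
      some (if mc ≤ t ∨ t + goatTripsB cap (R.length + 1) R 0 ≤ mc then some cap else none) :=
  fun R hle hne t f hf => innerAbs_main_aux cap mc R.length R rfl hle hne t f hf

-- biggest_goat on (s, sent) computes firstFit on the remaining list R
theorem descI_head (x : Int) (l : List Int) (h : DescI (x :: l)) : ∀ v ∈ x :: l, v ≤ x := by
  intro v hv
  rcases List.mem_cons.mp hv with rfl | hv
  · exact le_refl v
  · exact List.rel_of_pairwise_cons h hv

theorem firstFit_max (free : Int) (R : List Int) (g : Int) (hR : DescI R)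
    (h : firstFit free R = some g) : ∀ v ∈ R, v ≤ free → v ≤ g := by
  induction R with
  | nil => simp [firstFit] at h
  | cons x rest ih =>
    simp only [firstFit] at h
    split at h
    · rcases Option.some.inj h with rfl
      intro v hv _
      exact descI_head x rest hR v hv
    · rename_i hx
      intro v hv hvf
      rcases List.mem_cons.mp hv with rfl | hv
      · omega
      · exact ih (List.Pairwise.of_cons hR) h v hv hvf

theorem bgGo_none (free : Int) (s sent R : List Int)
    (hcnt : ∀ v : Int, s.count v = sent.count v + R.count v)
    (hbig : ∀ v ∈ R, free < v) :
    ∀ l, biggestGoatGo free s sent l = -1 := by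
  intro l
  induction l with
  | nil => rfl
  | cons u rest ih =>
    simp only [biggestGoatGo]
    rw [if_neg, ih]
    rintro ⟨h1, h2⟩
    have hu : u ∈ R := List.count_pos_iff.mp (by have := hcnt u; omega)
    exact absurd h1 (by have := hbig u hu; omega)

theorem bgGo_some (free : Int) (s sent R : List Int) (g : Int)
    (hcnt : ∀ v : Int, s.count v = sent.count v + R.count v)
    (hgR : g ∈ R) (hgf : g ≤ free) (hmax : ∀ v ∈ R, v ≤ free → v ≤ g) :
    ∀ l, DescI l → g ∈ l → biggestGoatGo free s sent l = g := by
  intro l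
  induction l with
  | nil => intro _ h; simp at h
  | cons u rest ih =>
    intro hd hg
    simp only [biggestGoatGo]
    by_cases hc : u ≤ free ∧ sent.count u < s.count u
    · rw [if_pos hc]
      have huR : u ∈ R := List.count_pos_iff.mp (by have := hcnt u; omega)
      have h1 : u ≤ g := hmax u huR hc.1
      have h2 : g ≤ u := descI_head u rest hd g hg
      omega
    · rw [if_neg hc]
      have hgrest : g ∈ rest := by
        rcases List.mem_cons.mp hg with rfl | h
        · exact absurd ⟨hgf, by have := hcnt g; have := List.count_pos_iff.mpr hgR; omega⟩ hc
        · exact h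
      exact ih (List.Pairwise.of_cons hd) hgrest

theorem biggestGoat_eq (free : Int) (s sent R : List Int)
    (hs : DescI s) (hR : DescI R)
    (hcnt : ∀ v : Int, s.count v = sent.count v + R.count v) :
    biggestGoat free s sent = (firstFit free R).getD (-1) := by
  cases hfit : firstFit free R with
  | none =>
    exact bgGo_none free s sent R hcnt (firstFit_none free R hfit) s
  | some g =>
    obtain ⟨hgR, hgf⟩ := firstFit_some free R g hfit
    have hgs : g ∈ s := List.count_pos_iff.mp
      (by have := hcnt g; have := List.count_pos_iff.mpr hgR; omega)
    exact bgGo_some free s sent R g hcnt hgR hgf (firstFit_max free R g hR hfit) s hs hgs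

-- A's concrete inner loop equals the abstract one
theorem descI_sorted_rev (xs : List Int) : DescI (PySem.List.sorted xs (fun x => x) true) := by
  have := PySem.List.sorted_pairwise_rev (xs := xs) (key := fun x : Int => x)
  simpa [DescI] using this

theorem count_sorted_rev (xs : List Int) (v : Int) :
    (PySem.List.sorted xs (fun x => x) true).count v = xs.count v :=
  (PySem.List.sorted_perm xs (fun x => x) true).count_eq v

-- A's concrete inner loop equals the abstract one
theorem innerA_eq_abs (s : List Int) (cap mc : Int) (hs : DescI s) :
    ∀ (f : Nat) (free t : Int) (sent R : List Int), DescI sent → DescI R →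
    (∀ v ∈ R, 0 ≤ v) → (∀ v : Int, s.count v = sent.count v + R.count v) →
    goatInnerA s cap mc f free t sent = innerAbs cap mc f free t R := by
  intro f
  induction f with
  | zero => intros; rfl
  | succ f ih =>
    intro free t sent R hdsent hdR hnn hcnt
    simp only [goatInnerA, innerAbs]
    rw [biggestGoat_eq free s sent R hs hdR hcnt]
    cases hfit : firstFit free R with
    | none =>
      simp only [Option.getD_none]
      rw [if_neg (by norm_num)]
      by_cases hm : t + 1 = mc
      · rw [if_pos hm, if_pos hm]
      · rw [if_neg hm, if_neg hm]
        exact ih cap (t + 1) sent R hdsent hdR hnn hcnt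
    | some g =>
      simp only [Option.getD_some]
      have hgR : g ∈ R := (firstFit_some free R g hfit).1
      have hg0 : 0 ≤ g := hnn g hgR
      have hRpos : 0 < R.count g := List.count_pos_iff.mpr hgR
      rw [if_pos hg0]
      have hdsent' : DescI (PySem.List.sorted (sent ++ [g]) (fun x => x) true) :=
        descI_sorted_rev _
      have hcntS' : ∀ v : Int, (PySem.List.sorted (sent ++ [g]) (fun x => x) true).count v
          = sent.count v + if g == v then 1 else 0 := by
        intro v
        rw [count_sorted_rev, List.count_append, List.count_singleton]
      have hcnt' : ∀ v : Int, s.count v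
          = (PySem.List.sorted (sent ++ [g]) (fun x => x) true).count v + (R.erase g).count v := by
        intro v
        rw [hcntS', List.count_erase]
        by_cases hv : g = v
        · subst hv
          have := hcnt g
          simp
          omega
        · have := hcnt v
          simp only [beq_iff_eq, if_neg hv]
          omega
      have hiff : (PySem.List.sorted (sent ++ [g]) (fun x => x) true = s) ↔ R.erase g = [] := by
        constructor
        · intro h
          have hz : ∀ v : Int, (R.erase g).count v = 0 := by
            intro v
            have h1 := hcnt' v
            rw [h] at h1
            omega
          rcases hx : R.erase g with _ | ⟨x, xs⟩
          · rfl
          · have := hz x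
            rw [hx] at this
            simp at this
        · intro h
          have hceq : ∀ v : Int, (PySem.List.sorted (sent ++ [g]) (fun x => x) true).count v
              = s.count v := by
            intro v
            have h1 := hcnt' v
            rw [h] at h1
            simp at h1
            omega
          exact List.Perm.eq_of_pairwise
            (fun a b _ _ h1 h2 => le_antisymm h2 h1) hdsent' hs
            (List.perm_iff_count.mpr hceq)
      by_cases hemp : R.erase g = []
      · rw [if_pos (hiff.mpr hemp), if_pos hemp]
      · rw [if_neg (fun h => hemp (hiff.mp h)), if_neg hemp]
        exact ih (free - g) t _ (R.erase g) hdsent'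
          (List.Pairwise.sublist (List.erase_sublist ..) hdR)
          (fun v hv => hnn v (List.mem_of_mem_erase hv)) hcnt'

-- the two outer loops agree (mc ≥ 1; both given enough fuel to reach capacity = sum)
theorem tripsB_one (cap : Int) (s : List Int) (hne : s ≠ []) (hscan : scanT cap s = []) :
    goatTripsB cap (s.length + 1) s 0 = 1 := by
  cases s with
  | nil => exact absurd rfl hne
  | cons g rest => rw [tripsB_step, hscan, tripsB_nil]; norm_num

-- the two outer loops agree (mc ≥ 1; both given enough fuel to reach capacity = sum)
theorem outer_eq (s : List Int) (mc : Int) (hs : DescI s) (hne : s ≠ [])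
    (hnn : ∀ v ∈ s, 0 ≤ v) (hmc : 1 ≤ mc) :
    ∀ (f : Nat) (cap : Int), 1 ≤ f → (∀ v ∈ s, v ≤ cap) → s.sum ≤ cap + (f : Int) - 1 →
    goatOuterA s mc f cap = some (goatOuterB s mc f cap) := by
  intro f
  induction f with
  | zero => intro cap h0 _ _; omega
  | succ f ih =>
    intro cap _ hcap hsum
    have hsim : goatInnerA s cap mc (2 * s.length + 2) cap 0 []
        = innerAbs cap mc (2 * s.length + 2) cap 0 s :=
      innerA_eq_abs s cap mc hs _ cap 0 [] s List.Pairwise.nil hs hnn (by simp)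
    have hmain := innerAbs_main cap mc s (fun v hv => ⟨hnn v hv, hcap v hv⟩) hne 0 _ le_rfl
    simp only [goatOuterA, goatOuterB]
    rw [hsim, hmain]
    by_cases hT : goatTripsB cap (s.length + 1) s 0 ≤ mc
    · rw [if_pos (Or.inr (by omega)), if_pos hT]
    · rw [if_neg (by omega), if_neg hT]
      have hcapsum : ¬ s.sum ≤ cap := by
        intro hsc
        exact hT (by rw [tripsB_one cap s hne (scanT_nil_of_sum_le cap s hnn hsc)]; omega)
      have hf1 : 1 ≤ f := by
        push_cast at hsum
        omega
      exact ih (cap + 1) hf1 (fun v hv => by have := hcap v hv; omega)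
        (by push_cast at hsum ⊢; omega)

-- ===== VERDICT (by name: the statement is the Claim_ definition above) =====
theorem goat_spec : Claim_equal_goat := by
  unfold Claim_equal_goat
  intro goats_count mc goats _ hpre
  obtain ⟨hne, hnn0⟩ := hpre
  unfold Spec_goat goat goat_alt
  simp only []
  have hds := descI_sorted_rev goats
  have hp := PySem.List.sorted_perm goats (fun x => x) true
  have hnn : ∀ v ∈ PySem.List.sorted goats (fun x => x) true, 0 ≤ v :=
    fun v hv => hnn0 v (hp.subset hv)
  cases hsdef : PySem.List.sorted goats (fun x => x) true with
  | nil =>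
    rw [hsdef] at hp
    exact absurd (hp.symm.eq_nil) hne
  | cons m rest =>
    rw [hsdef] at hds hp hnn
    rw [PySem.List.pyGet?_zero_cons]
    dsimp only
    have hmax : ∀ v ∈ m :: rest, v ≤ m := descI_head m rest hds
    have hm0 : 0 ≤ m := hnn m List.mem_cons_self
    have hsum_m : m ≤ (m :: rest).sum := List.single_le_sum hnn m List.mem_cons_self
    have hfuel : ((m :: rest).sum - m).toNat + 1 ≥ 1 := by omega
    by_cases hmc : mc ≤ 0
    · rw [if_pos hmc]
      have hsim : goatInnerA (m :: rest) m mc (2 * (m :: rest).length + 2) m 0 []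
          = innerAbs m mc (2 * (m :: rest).length + 2) m 0 (m :: rest) :=
        innerA_eq_abs (m :: rest) m mc hds _ m 0 [] (m :: rest) List.Pairwise.nil hds hnn (by simp)
      have hmain := innerAbs_main m mc (m :: rest)
        (fun v hv => ⟨hnn v hv, hmax v hv⟩) (by simp) 0 _ le_rfl
      have hstep : (((m :: rest).sum - m).toNat + 1) = (((m :: rest).sum - m).toNat) + 1 := rfl
      simp only [goatOuterA]
      rw [hsim, hmain, if_pos (Or.inl hmc)]
      rfl
    · rw [if_neg hmc]
      rw [outer_eq (m :: rest) mc hds (by simp) hnn (by omega) _ m (by omega) hmax ?hsum]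
      · rfl
      case hsum =>
        have : (((m :: rest).sum - m).toNat : Int) = (m :: rest).sum - m := by omega
        push_cast
        omega
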